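-- pv_equiv track=rewrite | github.com/LilyYC/legendary-train | Python/Tweet/tweets.py | unique_hashtag
-- ===== SOURCE A (Python) =====
-- def unique_hashtag(dic):
--     """dict of {str: list of str} -> dict of {str: list of str}}
--
--     Return a dictionary with hashtag as keys and candidate in dic as values.
--
--     >>> dic = {'D': ['a', '1', '2'], 'M': ['a', 'i'], 'N': ['1', '0', '']}
--     >>> unique_hashtag(dic) == {'2': 'D', 'i': 'M', '0': 'N', '': 'N'}
--     True
--     """
--
--     unique_ht = {}
--     extract_unique = {}
--     # First reverse the dictionary
--     for candidate in dic:
--         for i in range(len(dic[candidate])):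
--             hashtag = dic[candidate][i]
--             if  hashtag not in unique_ht:
--                 unique_ht[hashtag] = [candidate]
--             else:
--                 unique_ht[hashtag].append(candidate)
--     # To extract unique hashtag from the reversed dictionary
--     for ht in unique_ht:
--         if len(unique_ht[ht]) == 1:
--             extract_unique[ht] = unique_ht[ht][0]
--     return extract_unique
-- ===== SOURCE B (Python) =====
-- def unique_hashtag(dic):
--     seen = set()
--     result = {}
--     for candidate, hashtags in dic.items():
--         for hashtag in hashtags:
--             if hashtag in seen:
--                 result.pop(hashtag, None)
--             else:
--                 seen.add(hashtag)
--                 result[hashtag] = candidate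
--     return result
-- ===== Notes on version B (the rewrite author's own statement) =====
-- stated objective: simpler
-- what changed: Single pass with a persistent seen-set and a result dict (first sighting records the candidate, any repeat sighting evicts the hashtag), instead of building the full hashtag->list-of-candidates reverse index and then filtering it in a second pass.
import Mathlib
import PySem

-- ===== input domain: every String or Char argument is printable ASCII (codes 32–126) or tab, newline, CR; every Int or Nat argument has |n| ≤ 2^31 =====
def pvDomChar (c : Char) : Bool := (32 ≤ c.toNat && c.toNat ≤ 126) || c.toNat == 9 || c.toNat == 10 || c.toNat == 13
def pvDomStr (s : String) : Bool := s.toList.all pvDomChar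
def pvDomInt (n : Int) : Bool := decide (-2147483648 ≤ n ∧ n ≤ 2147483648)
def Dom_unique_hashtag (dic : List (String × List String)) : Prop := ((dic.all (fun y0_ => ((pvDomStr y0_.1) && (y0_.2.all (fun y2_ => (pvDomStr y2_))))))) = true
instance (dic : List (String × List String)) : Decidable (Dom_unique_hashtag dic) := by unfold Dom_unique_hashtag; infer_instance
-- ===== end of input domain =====

-- B replaces A's two-pass reverse index (hashtag -> list of candidates, then filter to
-- singletons) by one pass with a persistent seen-set and a result dict; objective: simpler.

-- ===== PORT A =====
def unique_hashtag (dic : List (String × List String)) : List (String × String) :=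
  -- for candidate in dic: for i in range(len(dic[candidate])): …  (dic is a Python dict:
  -- iterating its keys and looking each key up is iterating its items)
  let unique_ht : PySem.Dict String (List String) :=
    dic.foldl (fun u p =>
      (PySem.List.pyRange 0 (p.2.length : Int) 1).foldl (fun u i =>
        let hashtag := PySem.List.pyGetD p.2 i ""
        if !(u.contains hashtag) then u.insert hashtag [p.1]
        else u.insert hashtag (u.getD hashtag [] ++ [p.1])) u) PySem.Dict.empty
  let extract_unique : PySem.Dict String String :=
    unique_ht.items.foldl (fun e q =>
      if q.2.length = 1 then e.insert q.1 (PySem.List.pyGetD q.2 0 "") else e) PySem.Dict.empty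
  extract_unique.items

-- ===== PORT B =====
def unique_hashtag_alt (dic : List (String × List String)) : List (String × String) :=
  let st : PySem.Set String × PySem.Dict String String :=
    dic.foldl (fun st p =>
      p.2.foldl (fun st hashtag =>
        if st.1.contains hashtag then (st.1, st.2.erase hashtag)   -- result.pop(hashtag, None)
        else (PySem.Set.add st.1 hashtag, st.2.insert hashtag p.1)) st)
      (PySem.Set.empty, PySem.Dict.empty)
  st.2.items

-- ===== PRECONDITION & SPEC =====
def Spec_unique_hashtag (dic : List (String × List String)) (out : List (String × String)) : Prop := out = unique_hashtag_alt dic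
instance (dic : List (String × List String)) (out : List (String × String)) : Decidable (Spec_unique_hashtag dic out) := by unfold Spec_unique_hashtag; infer_instance

-- ===== CLAIM (what is proved, stated in full; the proofs are below) =====
def Claim_equal_unique_hashtag : Prop := ∀ (dic : List (String × List String)), Dom_unique_hashtag dic → Spec_unique_hashtag dic (unique_hashtag dic)

-- ===== LEMMAS AND PROOFS =====

def pvStepA (u : PySem.Dict String (List String)) (w : String × String) :
    PySem.Dict String (List String) :=
  if !(u.contains w.2) then u.insert w.2 [w.1] else u.insert w.2 (u.getD w.2 [] ++ [w.1])

def pvStepB (st : PySem.Set String × PySem.Dict String String) (w : String × String) :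
    PySem.Set String × PySem.Dict String String :=
  if st.1.contains w.2 then (st.1, st.2.erase w.2)
  else (PySem.Set.add st.1 w.2, st.2.insert w.2 w.1)

def pvF (q : String × List String) : String × String := (q.1, q.2.headD "")

def pvLen1 (q : String × List String) : Bool := decide (q.2.length = 1)

theorem pv_flat {β : Type} (dic : List (String × List String)) (g : β → String × String → β)
    (init : β) :
    dic.foldl (fun acc p => p.2.foldl (fun acc h => g acc (p.1, h)) acc) init
      = (dic.flatMap (fun p => p.2.map (fun h => (p.1, h)))).foldl g init := by
  induction dic generalizing init with
  | nil => rfl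
  | cons p t ih =>
      simp only [List.foldl_cons, List.flatMap_cons, List.foldl_append, List.foldl_map, ih]

theorem pv_contains_keys (u : PySem.Dict String (List String)) (k : String) :
    PySem.Set.contains u.keys k = u.contains k := by
  rw [PySem.Dict.contains_eq_decide_mem_keys]
  simp [PySem.Set.contains]

-- updating the (unique) entry at k with a now-length-≥-2 value is, after the
-- singleton filter, exactly deleting key k
theorem pv_filter_map_update (l : List (String × List String)) (k c : String)
    (v : List String) (hvne : v ≠ []) :
    ((l.map (fun p => if p.1 == k then (k, v ++ [c]) else p)).filter pvLen1).map pvF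
      = ((l.filter pvLen1).map pvF).filter (fun p => !(p.1 == k)) := by
  have hlen : pvLen1 (k, v ++ [c]) = false := by
    cases v with
    | nil => exact absurd rfl hvne
    | cons x xs => simp [pvLen1]
  induction l with
  | nil => rfl
  | cons a tl ih =>
      by_cases hk : (a.1 == k) = true
      · simp only [List.map_cons, List.filter_cons, hk, if_pos, hlen]
        by_cases hl : pvLen1 a = true
        · simpa [hl, hk, pvF] using ih
        · simpa [hl] using ih
      · have hk' : (a.1 == k) = false := by simpa using hk
        simp only [List.map_cons, List.filter_cons, hk']
        by_cases hl : pvLen1 a = true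
        · simpa [hl, hk', pvF] using ih
        · simpa [hl] using ih

theorem pv_inv (ws : List (String × String)) (u : PySem.Dict String (List String))
    (s : PySem.Set String) (r : PySem.Dict String String)
    (hnd : u.keys.Nodup) (hs : s = u.keys)
    (hne : ∀ q ∈ u.items, q.2 ≠ [])
    (hr : r.items = (u.items.filter pvLen1).map pvF) :
    ((ws.foldl pvStepA u).keys.Nodup ∧
     (ws.foldl pvStepB (s, r)).1 = (ws.foldl pvStepA u).keys) ∧
    ((∀ q ∈ (ws.foldl pvStepA u).items, q.2 ≠ []) ∧
     (ws.foldl pvStepB (s, r)).2.items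
        = (((ws.foldl pvStepA u)).items.filter pvLen1).map pvF) := by
  induction ws generalizing u s r with
  | nil => exact ⟨⟨hnd, hs⟩, hne, hr⟩
  | cons w t ih =>
      simp only [List.foldl_cons]
      by_cases hb : u.contains w.2 = true
      · -- repeated hashtag: A grows the entry past length 1, B evicts it
        have hsb : s.contains w.2 = true := by
          have := pv_contains_keys u w.2
          rw [hs, PySem.Set.contains] at *
          rw [this, hb]
        have hA : pvStepA u w = u.insert w.2 (u.getD w.2 [] ++ [w.1]) := by
          simp [pvStepA, hb]
        have hB : pvStepB (s, r) w = (s, r.erase w.2) := by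
          simp only [pvStepB, hsb, if_true]
        obtain ⟨v, hv⟩ : ∃ v, u.get? w.2 = some v := by
          have := PySem.Dict.contains_eq_isSome_get? (d := u) (k := w.2)
          rw [hb] at this
          exact Option.isSome_iff_exists.mp this.symm
        have hvmem : (w.2, v) ∈ u.items := PySem.Dict.mem_items_of_get?_eq_some u hv
        have hvne : v ≠ [] := hne _ hvmem
        have hgd : u.getD w.2 [] = v := PySem.Dict.getD_of_get?_eq_some u [] hv
        rw [hA, hB]
        apply ih
        · rw [PySem.Dict.keys_insert_of_contains _ _ hb]; exact hnd
        · rw [PySem.Dict.keys_insert_of_contains _ _ hb]; exact hs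
        · intro q hq
          rw [PySem.Dict.items_insert_of_contains _ _ hb] at hq
          obtain ⟨p, hp, hpe⟩ := List.mem_map.mp hq
          by_cases hk : (p.1 == w.2) = true
          · rw [if_pos hk] at hpe
            subst hpe
            simp [hgd, hvne]
          · rw [if_neg hk] at hpe
            subst hpe
            exact hne _ hp
        · have herase : (r.erase w.2).items = r.items.filter (fun p => !(p.1 == w.2)) := by
            simp [PySem.Dict.erase]
          rw [herase, hr, PySem.Dict.items_insert_of_contains _ _ hb]
          rw [hgd, pv_filter_map_update u.items w.2 w.1 v hvne]
      · -- fresh hashtag: both append the new entry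
        have hb' : u.contains w.2 = false := by simpa using hb
        have hsb : s.contains w.2 = false := by
          have := pv_contains_keys u w.2
          rw [hs, PySem.Set.contains] at *
          rw [this, hb']
        have hmem : w.2 ∉ u.keys := by
          intro hm
          rw [PySem.Dict.contains_eq_decide_mem_keys] at hb'
          simp [hm] at hb'
        have hA : pvStepA u w = u.insert w.2 [w.1] := by
          simp [pvStepA, hb']
        have hB : pvStepB (s, r) w = (PySem.Set.add s w.2, r.insert w.2 w.1) := by
          simp only [pvStepB, hsb, Bool.false_eq_true, if_false]
        have hsadd : PySem.Set.add s w.2 = s ++ [w.2] := by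
          have h0 : List.contains s w.2 = false := hsb
          simp only [List.contains_eq_mem, decide_eq_false_iff_not] at h0
          simp [PySem.Set.add, PySem.Set.contains, h0]
        have hrc : r.contains w.2 = false := by
          rw [PySem.Dict.contains_eq_decide_mem_keys]
          simp only [decide_eq_false_iff_not]
          intro hm
          apply hmem
          rw [PySem.Dict.keys] at hm ⊢
          rw [hr] at hm
          simp only [List.map_map, List.mem_map, Function.comp] at hm
          obtain ⟨q, hq, hqe⟩ := hm
          exact List.mem_map.mpr ⟨q, List.mem_of_mem_filter hq, hqe⟩
        rw [hA, hB]
        apply ih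
        · rw [PySem.Dict.keys_insert_of_not_contains _ _ hb']
          exact List.Nodup.append hnd (List.nodup_singleton _)
            (by simpa [List.disjoint_singleton] using hmem)
        · rw [PySem.Dict.keys_insert_of_not_contains _ _ hb', hsadd, hs]
        · intro q hq
          rw [PySem.Dict.items_insert_of_not_contains _ _ hb'] at hq
          rcases List.mem_append.mp hq with h | h
          · exact hne _ h
          · simp at h
            subst h
            simp
        · rw [PySem.Dict.items_insert_of_not_contains _ _ hrc,
            PySem.Dict.items_insert_of_not_contains _ _ hb', hr]
          have : pvLen1 (w.2, [w.1]) = true := by simp [pvLen1]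
          simp [List.filter_append, this, pvF]


theorem pv_innerA (xs : List String) (c : String) (u : PySem.Dict String (List String)) :
    (PySem.List.pyRange 0 (xs.length : Int) 1).foldl (fun u i =>
        let hashtag := PySem.List.pyGetD xs i ""
        if !(u.contains hashtag) then u.insert hashtag [c]
        else u.insert hashtag (u.getD hashtag [] ++ [c])) u
      = xs.foldl (fun u h => pvStepA u (c, h)) u := by
  have he : (fun (u : PySem.Dict String (List String)) (i : Int) =>
      let hashtag := PySem.List.pyGetD xs i ""
      if !(u.contains hashtag) then u.insert hashtag [c]
      else u.insert hashtag (u.getD hashtag [] ++ [c]))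
      = (fun u i => pvStepA u (c, PySem.List.pyGetD xs i "")) := rfl
  rw [he]
  exact PySem.List.foldl_pyRange_pyGetD' (f := fun u h => pvStepA u (c, h)) (d := "")
    (xs := xs) (init := u) (a := 0) (by omega)

theorem pv_head (q : String × List String) (h : pvLen1 q = true) :
    PySem.List.pyGetD q.2 0 "" = q.2.headD "" := by
  obtain ⟨k, l⟩ := q
  match l with
  | [x] => simp [PySem.List.pyGetD, PySem.List.pyGet?, PySem.List.pyIdx?]
  | [] => simp [pvLen1] at h
  | x :: y :: t => simp [pvLen1] at h

-- ===== VERDICT (by name: the statement is the Claim_ definition above) =====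
theorem unique_hashtag_spec : Claim_equal_unique_hashtag := by
  intro dic _
  show unique_hashtag dic = unique_hashtag_alt dic
  have h1 : dic.foldl (fun u p =>
      (PySem.List.pyRange 0 (p.2.length : Int) 1).foldl (fun u i =>
        let hashtag := PySem.List.pyGetD p.2 i ""
        if !(u.contains hashtag) then u.insert hashtag [p.1]
        else u.insert hashtag (u.getD hashtag [] ++ [p.1])) u) PySem.Dict.empty
      = (dic.flatMap (fun p => p.2.map (fun h => (p.1, h)))).foldl pvStepA PySem.Dict.empty := by
    rw [← pv_flat]
    exact PySem.List.foldl_congr_mem dic _ _ _ (fun acc x hx => pv_innerA x.2 x.1 acc)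
  have h2 : dic.foldl (fun st p =>
      p.2.foldl (fun (st : PySem.Set String × PySem.Dict String String) hashtag =>
        if st.1.contains hashtag then (st.1, st.2.erase hashtag)
        else (PySem.Set.add st.1 hashtag, st.2.insert hashtag p.1)) st)
      (PySem.Set.empty, PySem.Dict.empty)
      = (dic.flatMap (fun p => p.2.map (fun h => (p.1, h)))).foldl pvStepB
          (PySem.Set.empty, PySem.Dict.empty) := by
    rw [← pv_flat]
    exact PySem.List.foldl_congr_mem dic _ _ _ (fun acc x hx => rfl)
  obtain ⟨⟨hnd, -⟩, -, hitems⟩ := pv_inv (dic.flatMap (fun p => p.2.map (fun h => (p.1, h))))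
    PySem.Dict.empty PySem.Set.empty PySem.Dict.empty (by simp) rfl (by simp [PySem.Dict.empty]) rfl
  unfold unique_hashtag unique_hashtag_alt
  rw [h1, h2]
  set U := (dic.flatMap (fun p => p.2.map (fun h => (p.1, h)))).foldl pvStepA PySem.Dict.empty
    with hU
  rw [hitems]
  show (U.items.foldl (fun e q =>
      if q.2.length = 1 then e.insert q.1 (PySem.List.pyGetD q.2 0 "") else e)
      PySem.Dict.empty).items = List.map pvF (List.filter pvLen1 U.items)
  refine Eq.trans (congrArg PySem.Dict.items
    (PySem.List.foldl_ite_eq_foldl_filter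
      (p := fun q : String × List String => q.2.length = 1)
      (f := fun e q => e.insert q.1 (PySem.List.pyGetD q.2 0 ""))
      (l := U.items) (init := PySem.Dict.empty))) ?_
  have hpl : (fun q : String × List String => decide (q.2.length = 1)) = pvLen1 := rfl
  rw [hpl]
  have hsub : ((U.items.filter pvLen1).map Prod.fst).Sublist U.keys :=
    List.Sublist.map Prod.fst List.filter_sublist
  rw [PySem.Dict.items_foldl_insert_fresh (U.items.filter pvLen1) Prod.fst
    (fun q => PySem.List.pyGetD q.2 0 "") PySem.Dict.empty
    (fun a _ => PySem.Dict.contains_empty _) (hnd.sublist hsub)]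
  show PySem.Dict.empty.items ++ _ = _
  rw [show (PySem.Dict.empty : PySem.Dict String String).items = [] from rfl,
    List.nil_append]
  exact (List.map_congr_left (fun q hq => by
    rw [pvF, pv_head q (List.mem_filter.mp hq).2])).symm
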